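-- pv_equiv track=rewrite | github.com/tiberiu-popa/steam-roll | hackerrank/interview_kit/poisonous_plants.py | poisonousPlantsSlow
-- ===== SOURCE A (Python) =====
-- def poisonousPlantsSlow(p):
--     steps = 0
--     while True:
--         q = []
--         for i, x in enumerate(p):
--             if i == 0 or p[i - 1] >= x:
--                 q.append(x)
--         if len(p) == len(q):
--             break
--         p = q
--         steps += 1
--     return steps
-- ===== SOURCE B (Python) =====
-- def poisonousPlantsSlow(p):
--     # Monotonic stack: for each plant compute the day it dies; answer = max day.
--     stack = []  # pairs (value, day-it-dies; 0 = never), value strictly decreasing towards bottom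
--     ans = 0
--     for x in p:
--         d = 0
--         while stack and stack[-1][0] >= x:
--             d = max(d, stack.pop()[1])
--         d = d + 1 if stack else 0
--         stack.append((x, d))
--         ans = max(ans, d)
--     return ans
-- ===== Notes on version B (the rewrite author's own statement) =====
-- stated objective: alternative
-- what changed: Replaced the repeated full-pass simulation of removal rounds with a single left-to-right pass using a monotonic stack that records, per plant, the day it dies; the answer is the maximum such day.
import Mathlib
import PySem

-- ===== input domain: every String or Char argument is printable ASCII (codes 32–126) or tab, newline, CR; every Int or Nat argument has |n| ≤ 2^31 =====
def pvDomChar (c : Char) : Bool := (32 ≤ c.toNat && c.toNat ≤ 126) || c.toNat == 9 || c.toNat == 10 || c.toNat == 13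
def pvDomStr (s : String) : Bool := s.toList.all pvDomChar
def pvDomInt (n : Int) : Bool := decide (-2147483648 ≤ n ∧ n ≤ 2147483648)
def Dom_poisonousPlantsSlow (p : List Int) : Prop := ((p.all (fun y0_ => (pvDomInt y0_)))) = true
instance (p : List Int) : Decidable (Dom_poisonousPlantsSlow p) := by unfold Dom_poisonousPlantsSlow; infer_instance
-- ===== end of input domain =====

-- B replaces A's repeated removal-round simulation by a single monotonic-stack pass
-- recording each plant's death day; equal return value proved for all inputs.


-- ===== PORT A =====
-- inner pass: q = [x for i,x in enumerate(p) if i == 0 or p[i-1] >= x]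
def aRound (p : List Int) : List Int :=
  (PySem.List.enumerate p 0).foldl
    (fun q ix =>
      if ix.1 = 0 ∨ (PySem.List.pyGet? p (ix.1 - 1)).getD 0 ≥ ix.2 then q ++ [ix.2] else q) []

-- termination helper for the while-loop (cited by aLoop's decreasing_by)
theorem aRound_foldl_sublist (l : List (Int × Int)) (c : Int × Int → Prop) [DecidablePred c] :
    ∀ q0 : List Int,
      List.Sublist (l.foldl (fun q ix => if c ix then q ++ [ix.2] else q) q0) (q0 ++ l.map (·.2)) := by
  induction l with
  | nil => intro q0; simp
  | cons ix l ih =>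
      intro q0
      by_cases h : c ix
      · simpa [h, List.foldl_cons, List.append_assoc] using ih (q0 ++ [ix.2])
      · simp only [List.foldl_cons, if_neg h, List.map_cons]
        exact (ih q0).trans (List.Sublist.append_left ((List.map (·.2) l).sublist_cons_self ix.2) q0)

theorem aRound_sublist (p : List Int) : List.Sublist (aRound p) p := by
  have h := aRound_foldl_sublist (PySem.List.enumerate p 0)
      (fun ix => ix.1 = 0 ∨ (PySem.List.pyGet? p (ix.1 - 1)).getD 0 ≥ ix.2) []
  simpa [aRound, PySem.List.map_snd_enumerate] using h

-- the while-True loop of A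
def aLoop (p : List Int) (steps : Int) : Int :=
  let q := aRound p
  if h : p.length = q.length then steps
  else aLoop q (steps + 1)
termination_by p.length
decreasing_by
  have hle : q.length ≤ p.length := (aRound_sublist p).length_le
  have hq : q.length = (aRound p).length := rfl
  omega

def poisonousPlantsSlow (p : List Int) : Int := aLoop p 0

-- ===== PORT B =====
-- while stack and stack[-1][0] >= x: d = max(d, stack.pop()[1])   (top of stack = list head)
def popGE (stack : List (Int × Int)) (x : Int) (d : Int) : List (Int × Int) × Int :=
  match stack with
  | [] => ([], d)
  | (v, dv) :: rest => if v ≥ x then popGE rest x (max d dv) else ((v, dv) :: rest, d)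

-- one iteration of the for-loop body of B
def bStep (s : List (Int × Int) × Int) (x : Int) : List (Int × Int) × Int :=
  let st' := popGE s.1 x 0
  let d := if st'.1 = [] then 0 else st'.2 + 1
  ((x, d) :: st'.1, max s.2 d)

def poisonousPlantsSlow_alt (p : List Int) : Int :=
  (p.foldl bStep ([], 0)).2

-- ===== PRECONDITION & SPEC =====
def Spec_poisonousPlantsSlow (p : List Int) (out : Int) : Prop := out = poisonousPlantsSlow_alt p
instance (p : List Int) (out : Int) : Decidable (Spec_poisonousPlantsSlow p out) := by unfold Spec_poisonousPlantsSlow; infer_instance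

-- ===== CLAIM (what is proved, stated in full; the proofs are below) =====
def Claim_equal_poisonousPlantsSlow : Prop := ∀ (p : List Int), Dom_poisonousPlantsSlow p → Spec_poisonousPlantsSlow p (poisonousPlantsSlow p)

-- ===== LEMMAS AND PROOFS =====

-- recursive formulation of one removal round
def roundT (prev : Int) (l : List Int) : List Int :=
  match l with
  | [] => []
  | x :: l' => (if prev ≥ x then [x] else []) ++ roundT x l'

def round1 (p : List Int) : List Int :=
  match p with
  | [] => []
  | a :: l => a :: roundT a l

theorem roundT_sublist (l : List Int) : ∀ prev, List.Sublist (roundT prev l) l := by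
  induction l with
  | nil => intro prev; simp [roundT]
  | cons x l ih =>
      intro prev
      by_cases h : prev ≥ x
      · simpa [roundT, h] using (ih x).cons₂ x
      · simpa [roundT, h] using (ih x).cons x

theorem round1_sublist (p : List Int) : List.Sublist (round1 p) p := by
  cases p with
  | nil => simp [round1]
  | cons a l => simpa [round1] using (roundT_sublist l a).cons₂ a

theorem round1_ne_nil {p : List Int} (h : p ≠ []) : round1 p ≠ [] := by
  cases p with
  | nil => exact absurd rfl h
  | cons a l => simp [round1]

theorem round1_eq_iff_len (p : List Int) : round1 p = p ↔ p.length = (round1 p).length := by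
  constructor
  · intro h; rw [h]
  · intro h; exact (round1_sublist p).eq_of_length h.symm

-- step count, recursively (equals A's loop count)
def stepsN (p : List Int) : Nat :=
  if _h : p.length = (round1 p).length then 0 else 1 + stepsN (round1 p)
termination_by p.length
decreasing_by
  have hle := (round1_sublist p).length_le
  omega

def iterR (k : Nat) (p : List Int) : List Int :=
  match k with
  | 0 => p
  | k + 1 => iterR k (round1 p)

def lastD (t : List Int) : Int := (t.getLast?).getD 0

-- lastD of the k-th round
def fL (t : List Int) (k : Nat) : Int := lastD (iterR k t)

theorem iterR_succ' (k : Nat) (p : List Int) : iterR (k + 1) p = round1 (iterR k p) := by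
  induction k generalizing p with
  | zero => rfl
  | succ k ih => exact ih (round1 p)

theorem iterR_ne_nil {p : List Int} (h : p ≠ []) (k : Nat) : iterR k p ≠ [] := by
  induction k generalizing p with
  | zero => exact h
  | succ k ih => exact ih (round1_ne_nil h)

theorem round1_fix_iterR {t : List Int} (h : round1 t = t) (k : Nat) : iterR k t = t := by
  induction k with
  | zero => rfl
  | succ k ih => rw [iterR_succ', ih, h]

-- one round of a snoc
theorem roundT_snoc (l : List Int) : ∀ prev x,
    roundT prev (l ++ [x]) = roundT prev l ++ (if lastD (prev :: l) ≥ x then [x] else []) := by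
  induction l with
  | nil => intro prev x; simp [roundT, lastD]
  | cons y l ih =>
      intro prev x
      have hlast : lastD (prev :: y :: l) = lastD (y :: l) := by
        simp [lastD, List.getLast?_cons_cons]
      simp only [List.cons_append, roundT, ih y x, hlast, List.append_assoc]

theorem round1_snoc {t : List Int} (ht : t ≠ []) (x : Int) :
    round1 (t ++ [x]) = round1 t ++ (if lastD t ≥ x then [x] else []) := by
  cases t with
  | nil => exact absurd rfl ht
  | cons a l => simp [round1, roundT_snoc l a x]

theorem fL_zero (t : List Int) : fL t 0 = lastD t := rfl

theorem fL_round1 (t : List Int) (k : Nat) : fL (round1 t) k = fL t (k + 1) := rfl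

theorem lastD_snoc (l : List Int) (x : Int) : lastD (l ++ [x]) = x := by
  simp [lastD]

-- ---- recurrences for the step count on a snoc ----

theorem stepsN_eq (p : List Int) :
    stepsN p = if p.length = (round1 p).length then 0 else 1 + stepsN (round1 p) := by
  rw [stepsN]
  exact dite_eq_ite

theorem stepsN_immortal (x : Int) : ∀ (n : Nat) (t : List Int), t.length ≤ n → t ≠ [] →
    (∀ k, x ≤ fL t k) → stepsN (t ++ [x]) = stepsN t := by
  intro n
  induction n with
  | zero =>
      intro t hlen ht _
      cases t with
      | nil => exact absurd rfl ht
      | cons a l => simp at hlen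
  | succ n ih =>
      intro t hlen ht hk
      have h0 : lastD t ≥ x := hk 0
      have hsnoc : round1 (t ++ [x]) = round1 t ++ [x] := by
        rw [round1_snoc ht, if_pos h0]
      by_cases hfix : round1 t = t
      · have h1 : round1 (t ++ [x]) = t ++ [x] := by rw [hsnoc, hfix]
        rw [stepsN_eq (t ++ [x]), if_pos (by rw [h1]),
            stepsN_eq t, if_pos ((round1_eq_iff_len t).mp hfix)]
      · have hle := (round1_sublist t).length_le
        have hne2 : ¬ t.length = (round1 t).length :=
          fun h => hfix ((round1_eq_iff_len t).mpr h)
        have hne1 : ¬ (t ++ [x]).length = (round1 (t ++ [x])).length := by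
          rw [hsnoc]; simp only [List.length_append, List.length_cons, List.length_nil]; omega
        rw [stepsN_eq (t ++ [x]), if_neg hne1, hsnoc, stepsN_eq t, if_neg hne2,
            ih (round1 t) (by omega) (round1_ne_nil ht) (fun k => hk (k + 1))]

theorem stepsN_mortal (x : Int) : ∀ (n : Nat) (t : List Int), t.length ≤ n → t ≠ [] →
    ∀ (K : Nat), fL t K < x → (∀ j, j < K → x ≤ fL t j) →
    stepsN (t ++ [x]) = max (stepsN t) (K + 1) := by
  intro n
  induction n with
  | zero =>
      intro t hlen ht _ _ _
      cases t with
      | nil => exact absurd rfl ht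
      | cons a l => simp at hlen
  | succ n ih =>
      intro t hlen ht K hK hbelow
      cases K with
      | zero =>
          have h0 : ¬ lastD t ≥ x := by
            have hK' := hK
            rw [fL_zero] at hK'
            omega
          have hsnoc : round1 (t ++ [x]) = round1 t := by
            rw [round1_snoc ht, if_neg h0, List.append_nil]
          have hle := (round1_sublist t).length_le
          have hne1 : ¬ (t ++ [x]).length = (round1 (t ++ [x])).length := by
            rw [hsnoc]; simp only [List.length_append, List.length_cons, List.length_nil]; omega
          rw [stepsN_eq (t ++ [x]), if_neg hne1, hsnoc]
          by_cases hfix : round1 t = t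
          · rw [hfix, stepsN_eq t, if_pos ((round1_eq_iff_len t).mp hfix)]
            omega
          · have hne2 : ¬ t.length = (round1 t).length :=
              fun h => hfix ((round1_eq_iff_len t).mpr h)
            rw [stepsN_eq t, if_neg hne2]
            omega
      | succ K =>
          have h0 : lastD t ≥ x := by
            have := hbelow 0 (Nat.succ_pos K)
            rw [fL_zero] at this
            omega
          have hsnoc : round1 (t ++ [x]) = round1 t ++ [x] := by
            rw [round1_snoc ht, if_pos h0]
          have hfix : round1 t ≠ t := by
            intro hfix
            have hconst : fL t (K + 1) = fL t 0 := by
              unfold fL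
              rw [round1_fix_iterR hfix (K + 1), round1_fix_iterR hfix 0]
            rw [fL_zero] at hconst
            omega
          have hle := (round1_sublist t).length_le
          have hne2 : ¬ t.length = (round1 t).length :=
            fun h => hfix ((round1_eq_iff_len t).mpr h)
          have hne1 : ¬ (t ++ [x]).length = (round1 (t ++ [x])).length := by
            rw [hsnoc]; simp only [List.length_append, List.length_cons, List.length_nil]; omega
          rw [stepsN_eq (t ++ [x]), if_neg hne1, hsnoc, stepsN_eq t, if_neg hne2]
          rw [ih (round1 t) (by omega) (round1_ne_nil ht) K
            (by rw [fL_round1]; exact hK)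
            (fun j hj => by rw [fL_round1]; exact hbelow (j + 1) (by omega))]
          omega

-- ---- evolution of a snoc: the appended element is last while it survives ----

theorem iterR_snoc_alive {t : List Int} (ht : t ≠ []) (x : Int) :
    ∀ k : Nat, (∀ j, j < k → x ≤ fL t j) → iterR k (t ++ [x]) = iterR k t ++ [x] := by
  intro k
  induction k with
  | zero => intro _; rfl
  | succ k ih =>
      intro h
      have hx : lastD (iterR k t) ≥ x := h k (by omega)
      rw [iterR_succ', ih (fun j hj => h j (by omega)), iterR_succ',
          round1_snoc (iterR_ne_nil ht k), if_pos hx]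

theorem iterR_snoc_dead {t : List Int} (ht : t ≠ []) (x : Int) (K : Nat)
    (hK : fL t K < x) (hbelow : ∀ j, j < K → x ≤ fL t j) :
    ∀ k : Nat, K < k → iterR k (t ++ [x]) = iterR k t := by
  have hKlt : ¬ lastD (iterR K t) ≥ x := by
    unfold fL at hK
    omega
  have hstep : iterR (K + 1) (t ++ [x]) = iterR (K + 1) t := by
    rw [iterR_succ', iterR_snoc_alive ht x K hbelow, round1_snoc (iterR_ne_nil ht K),
        if_neg hKlt, List.append_nil, iterR_succ']
  intro k hk
  induction k with
  | zero => omega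
  | succ k ih =>
      rcases Nat.lt_or_ge K k with h | h
      · rw [iterR_succ', iterR_succ', ih h]
      · have hkK : k = K := by omega
        subst hkK
        exact hstep

-- ---- the stack invariant ----

-- SRep f b s: from day b on, the top-first stack s describes the step function f
-- (f k = value of the last survivor on day k); an entry (v, d) says f = v on
-- [b, d) and the rest takes over from max b d; a bottom entry (v, 0) says
-- f = v forever from its start on.
inductive SRep : (Nat → Int) → Int → List (Int × Int) → Prop where
  | single : ∀ (f : Nat → Int) (b v : Int),
      (∀ k : Nat, b ≤ (k : Int) → f k = v) → SRep f b [(v, 0)]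
  | cons : ∀ (f : Nat → Int) (b v d : Int) (rest : List (Int × Int)),
      0 ≤ d → (∀ k : Nat, b ≤ (k : Int) → (k : Int) < d → f k = v) →
      (∀ q ∈ rest, q.1 < v) → rest ≠ [] → SRep f (max b d) rest → SRep f b ((v, d) :: rest)

theorem SRep_ne_nil {f : Nat → Int} {b : Int} {s : List (Int × Int)} (h : SRep f b s) : s ≠ [] := by
  cases h <;> simp

theorem SRep_congr {f g : Nat → Int} {b : Int} {s : List (Int × Int)}
    (h : SRep f b s) (hfg : ∀ k : Nat, b ≤ (k : Int) → f k = g k) : SRep g b s := by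
  induction h generalizing g with
  | single b v hp =>
      exact SRep.single _ _ _ (fun k hk => (hfg k hk).symm.trans (hp k hk))
  | cons b v d rest hd hp hrest hne hrep ih =>
      exact SRep.cons _ _ _ _ _ hd (fun k h1 h2 => (hfg k h1).symm.trans (hp k h1 h2)) hrest hne
        (ih (fun k hk => hfg k (le_trans (le_max_left _ _) hk)))

theorem SRep_mono {f : Nat → Int} {b b' : Int} {s : List (Int × Int)}
    (h : SRep f b s) (hbb : b ≤ b') : SRep f b' s := by
  induction h generalizing b' with
  | single b v hp =>
      exact SRep.single _ _ _ (fun k hk => hp k (le_trans hbb hk))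
  | cons b v d rest hd hp hrest hne hrep ih =>
      exact SRep.cons _ _ _ _ _ hd (fun k h1 h2 => hp k (le_trans hbb h1) h2) hrest hne
        (ih (max_le_max hbb le_rfl))

theorem SRep_ub {f : Nat → Int} {b : Int} {s : List (Int × Int)} (h : SRep f b s) :
    ∀ v d r, s = (v, d) :: r → ∀ k : Nat, b ≤ (k : Int) → f k ≤ v := by
  induction h with
  | single b v0 hp =>
      intro v d r heq k hk
      simp only [List.cons.injEq, Prod.mk.injEq] at heq
      rw [hp k hk, heq.1.1]
  | cons b v0 d0 rest hd hp hrest hne hrep ih =>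
      intro v d r heq k hk
      simp only [List.cons.injEq, Prod.mk.injEq] at heq
      obtain ⟨⟨hv, _⟩, hr⟩ := heq
      subst hv
      by_cases hkd : (k : Int) < d0
      · exact le_of_eq (hp k hk hkd)
      · rw [not_lt] at hkd
        rcases List.exists_cons_of_ne_nil hne with ⟨⟨v1, d1⟩, rest', hrr⟩
        have h1 := ih v1 d1 rest' hrr k (max_le hk hkd)
        have h2 : v1 < v0 := hrest (v1, d1) (by rw [hrr]; exact List.mem_cons_self ..)
        omega

theorem SRep_tail_lt {f : Nat → Int} {b v d : Int} {rest : List (Int × Int)}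
    (h : SRep f b ((v, d) :: rest)) : ∀ q ∈ rest, q.1 < v := by
  cases h with
  | single => intro q hq; simp at hq
  | cons _ _ _ _ _ _ hrest _ _ => exact hrest

-- behaviour of the pop loop on a represented stack
theorem pop_spec : ∀ (s : List (Int × Int)) (f : Nat → Int) (b x : Int),
    SRep f b s → 0 ≤ b → (∀ k : Nat, (k : Int) < b → x ≤ f k) →
    ((popGE s x b).1 = [] → ∀ k : Nat, x ≤ f k) ∧
    ((popGE s x b).1 ≠ [] →
      0 ≤ (popGE s x b).2 ∧
      SRep f (popGE s x b).2 (popGE s x b).1 ∧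
      (∀ k : Nat, (k : Int) < (popGE s x b).2 → x ≤ f k) ∧
      (∀ k : Nat, (popGE s x b).2 ≤ (k : Int) → f k < x) ∧
      (∀ q ∈ (popGE s x b).1, q.1 < x)) := by
  intro s
  induction s with
  | nil =>
      intro f b x hrep
      exact absurd rfl (SRep_ne_nil hrep)
  | cons hd rest ih =>
      intro f b x hrep hb hlow
      obtain ⟨v, dv⟩ := hd
      by_cases hvx : v ≥ x
      · -- pop this entry and recurse
        have hpop : popGE ((v, dv) :: rest) x b = popGE rest x (max b dv) := by
          simp [popGE, hvx]
        cases hrep with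
        | single b v hp =>
            -- rest = [], everything is ≥ x forever: nothing gets popped below
            rw [hpop]
            constructor
            · intro _ k
              rcases le_or_gt b (k : Int) with h | h
              · rw [hp k h]; exact hvx
              · exact hlow k h
            · intro hne
              simp [popGE] at hne
        | cons b0 v0 dv0 rest0 hd0 hp hrest hne hrep' =>
            rw [hpop]
            have hlow' : ∀ k : Nat, (k : Int) < max b dv → x ≤ f k := by
              intro k hk
              rcases lt_or_ge (k : Int) b with h | h
              · exact hlow k h
              · have hkdv : (k : Int) < dv := by
                  rcases max_cases b dv with ⟨he, _⟩ | ⟨he, _⟩ <;> omega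
                rw [hp k h hkdv]
                exact hvx
            exact ih f (max b dv) x hrep' (le_trans hb (le_max_left _ _)) hlow'
      · -- stop here
        have hpop : popGE ((v, dv) :: rest) x b = ((v, dv) :: rest, b) := by
          simp [popGE, hvx]
        rw [hpop]
        refine ⟨by simp, fun _ => ⟨hb, hrep, hlow, ?_, ?_⟩⟩
        · intro k hk
          have := SRep_ub hrep v dv rest rfl k hk
          omega
        · intro q hq
          rcases List.mem_cons.mp hq with h | h
          · subst h; simp only; omega
          · have := SRep_tail_lt hrep q h
            omega

-- the invariant carried through B's fold
def BInv (t : List Int) (st : List (Int × Int)) (ans : Int) : Prop :=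
  (t = [] → st = [] ∧ ans = 0) ∧
  (t ≠ [] → SRep (fL t) 0 st ∧ ans = (stepsN t : Int))

theorem fL_singleton (x : Int) (k : Nat) : fL [x] k = x := by
  have hfix : round1 [x] = [x] := by simp [round1, roundT]
  unfold fL
  rw [round1_fix_iterR hfix k]
  simp [lastD]

theorem stepsN_singleton (x : Int) : stepsN [x] = 0 := by
  rw [stepsN_eq]
  simp [round1, roundT]

theorem bStep_unfold (st : List (Int × Int)) (ans x : Int) :
    bStep (st, ans) x =
      ((x, if (popGE st x 0).1 = [] then 0 else (popGE st x 0).2 + 1) :: (popGE st x 0).1,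
        max ans (if (popGE st x 0).1 = [] then 0 else (popGE st x 0).2 + 1)) := rfl

theorem inv_step {t : List Int} {st : List (Int × Int)} {ans : Int} (h : BInv t st ans) (x : Int) :
    BInv (t ++ [x]) (bStep (st, ans) x).1 (bStep (st, ans) x).2 := by
  obtain ⟨hnil, hcons⟩ := h
  by_cases ht : t = []
  · subst ht
    obtain ⟨hst, hans⟩ := hnil rfl
    subst hst; subst hans
    constructor
    · intro h; simp at h
    · intro _
      rw [bStep_unfold]
      have he : (popGE ([] : List (Int × Int)) x 0).1 = [] := rfl
      rw [if_pos he, he]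
      refine ⟨SRep.single _ _ _ (fun k _ => fL_singleton x k), ?_⟩
      simp [stepsN_singleton]
  · obtain ⟨hrep, hans⟩ := hcons ht
    have hspec := pop_spec st (fL t) 0 x hrep le_rfl (by intro k hk; omega)
    constructor
    · intro h; simp at h
    · intro _
      rw [bStep_unfold]
      by_cases hemp : (popGE st x 0).1 = []
      · -- x is never eaten
        have himm : ∀ k : Nat, x ≤ fL t k := hspec.1 hemp
        have hiter : ∀ k, iterR k (t ++ [x]) = iterR k t ++ [x] :=
          fun k => iterR_snoc_alive ht x k (fun j _ => himm j)
        have hfLs : ∀ k, fL (t ++ [x]) k = x := by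
          intro k
          unfold fL
          rw [hiter k, lastD_snoc]
        rw [if_pos hemp, hemp]
        refine ⟨SRep.single _ _ _ (fun k _ => hfLs k), ?_⟩
        have hst : stepsN (t ++ [x]) = stepsN t :=
          stepsN_immortal x t.length t le_rfl ht himm
        have hnn : (0 : Int) ≤ ans := by rw [hans]; exact Int.natCast_nonneg _
        simp only
        rw [hst, ← hans, max_eq_left hnn]
      · -- x dies on day (popGE st x 0).2 + 1
        obtain ⟨hd0, hrep', hlow, hhigh, hvals⟩ := hspec.2 hemp
        rw [if_neg hemp]
        set d0 := (popGE st x 0).2 with hd0def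
        set K : Nat := d0.toNat with hKdef
        have hKcast : (K : Int) = d0 := Int.toNat_of_nonneg hd0
        have hfK : fL t K < x := hhigh K (by omega)
        have hbelow : ∀ j, j < K → x ≤ fL t j := by
          intro j hj
          exact hlow j (by omega)
        have hfLs : ∀ k : Nat, fL (t ++ [x]) k = if (k : Int) ≤ d0 then x else fL t k := by
          intro k
          by_cases hk : (k : Int) ≤ d0
          · rw [if_pos hk]
            unfold fL
            rw [iterR_snoc_alive ht x k (fun j hj => hbelow j (by omega)), lastD_snoc]
          · rw [if_neg hk]
            unfold fL
            rw [iterR_snoc_dead ht x K hfK hbelow k (by omega)]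
        constructor
        · refine SRep.cons _ _ _ _ _ (by omega) ?_ hvals hemp ?_
          · intro k _ hk2
            rw [hfLs k, if_pos (by omega)]
          · have h1 : SRep (fL t) (d0 + 1) (popGE st x 0).1 := SRep_mono hrep' (by omega)
            have h2 : SRep (fL (t ++ [x])) (d0 + 1) (popGE st x 0).1 :=
              SRep_congr h1 (fun k hk => by rw [hfLs k, if_neg (by omega)])
            have hm : max (0 : Int) (d0 + 1) = d0 + 1 := max_eq_right (by omega)
            rwa [hm]
        · have hst : stepsN (t ++ [x]) = max (stepsN t) (K + 1) :=
            stepsN_mortal x t.length t le_rfl ht K hfK hbelow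
          simp only
          rw [hst]
          push_cast
          omega

theorem inv_foldl (p : List Int) : BInv p ((p.foldl bStep ([], 0)).1) ((p.foldl bStep ([], 0)).2) := by
  induction p using List.reverseRecOn with
  | nil =>
      constructor
      · intro _; simp
      · intro h; exact absurd rfl h
  | append_singleton t x ih =>
      rw [List.foldl_append, List.foldl_cons, List.foldl_nil]
      have h := inv_step ih x
      exact h

-- ---- A's port equals stepsN ----

theorem aRound_aux (p : List Int) : ∀ (l s : List Int) (prev : Int) (q : List Int),
    p = s ++ prev :: l →
    (PySem.List.enumerate l ((s.length : Int) + 1)).foldl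
      (fun q ix =>
        if ix.1 = 0 ∨ (PySem.List.pyGet? p (ix.1 - 1)).getD 0 ≥ ix.2 then q ++ [ix.2] else q) q
    = q ++ roundT prev l := by
  intro l
  induction l with
  | nil => intro s prev q _; simp [roundT, PySem.List.enumerate_nil]
  | cons x l ih =>
      intro s prev q hp
      rw [PySem.List.enumerate_cons, List.foldl_cons]
      have hget : PySem.List.pyGet? p ((s.length : Int) + 1 - 1) = some prev := by
        rw [hp]
        have hg := PySem.List.pyGet?_append_length s l prev
        simpa using hg
      have hcond : ((s.length : Int) + 1 = 0 ∨ (PySem.List.pyGet? p ((s.length : Int) + 1 - 1)).getD 0 ≥ x)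
          ↔ prev ≥ x := by
        rw [hget]
        simp only [Option.getD_some]
        constructor
        · intro h
          rcases h with h | h
          · omega
          · exact h
        · intro h; exact Or.inr h
      have hp' : p = (s ++ [prev]) ++ x :: l := by rw [hp]; simp
      have hstart : (s.length : Int) + 1 + 1 = ((s ++ [prev]).length : Int) + 1 := by
        simp [List.length_append]
      by_cases h : prev ≥ x
      · rw [if_pos (hcond.mpr h), hstart, ih (s ++ [prev]) x (q ++ [x]) hp']
        simp [roundT, h]
      · rw [if_neg (fun hc => h (hcond.mp hc)), hstart, ih (s ++ [prev]) x q hp']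
        simp [roundT, h]

theorem aRound_eq_round1 (p : List Int) : aRound p = round1 p := by
  cases p with
  | nil => simp [aRound, round1, PySem.List.enumerate_nil]
  | cons a l =>
      unfold aRound
      rw [PySem.List.enumerate_cons, List.foldl_cons]
      have h0 : ((0 : Int) = 0 ∨ (PySem.List.pyGet? (a :: l) ((0 : Int) - 1)).getD 0 ≥ a) := Or.inl rfl
      rw [if_pos h0]
      have h := aRound_aux (a :: l) l [] a [a] (by simp)
      simpa [round1] using h

theorem aLoop_eq : ∀ (n : Nat) (p : List Int), p.length ≤ n → ∀ c : Int,
    aLoop p c = c + (stepsN p : Int) := by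
  intro n
  induction n with
  | zero =>
      intro p hlen c
      have hp : p = [] := by
        cases p with
        | nil => rfl
        | cons a l => simp at hlen
      subst hp
      rw [aLoop]
      simp [aRound_eq_round1, round1, stepsN_eq]
  | succ n ih =>
      intro p hlen c
      rw [aLoop]
      simp only [aRound_eq_round1]
      rw [stepsN_eq]
      by_cases h : p.length = (round1 p).length
      · rw [dif_pos h, if_pos h]
        simp
      · rw [dif_neg h, if_neg h]
        have hlt : (round1 p).length < p.length := by
          have := (round1_sublist p).length_le
          omega
        rw [ih (round1 p) (by omega) (c + 1)]
        push_cast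
        ring

theorem a_eq_stepsN (p : List Int) : poisonousPlantsSlow p = (stepsN p : Int) := by
  unfold poisonousPlantsSlow
  rw [aLoop_eq p.length p le_rfl 0]
  ring

theorem b_eq_stepsN (p : List Int) : poisonousPlantsSlow_alt p = (stepsN p : Int) := by
  unfold poisonousPlantsSlow_alt
  by_cases hp : p = []
  · subst hp
    simp [stepsN_eq, round1]
  · exact ((inv_foldl p).2 hp).2

-- ===== VERDICT (by name: the statement is the Claim_ definition above) =====
theorem poisonousPlantsSlow_spec : Claim_equal_poisonousPlantsSlow := by
  intro p _
  unfold Spec_poisonousPlantsSlow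
  rw [a_eq_stepsN, b_eq_stepsN]
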